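-- pv_equiv track=rewrite | github.com/MiladyEmily/leetcode_tasks | february24.py | get_start_sequential
-- ===== SOURCE A (Python) =====
-- def get_start_sequential(start):
--     start = str(start)
--     current = ord(start[0])
--     start_digit = current - ord('1') + 1
--     if start_digit - 1 + len(start) > 9:
--         return 1, 1
--     for char in start:
--         if ord(char) == current:
--             current += 1
--             continue
--         if ord(char) > current:
--             if start_digit - 1 + len(start) > 9:
--                 return 1, 1
--             return start_digit + 1, 0
--         break
--     return start_digit, 0
-- ===== SOURCE B (Python) =====
-- def get_start_sequential(start):
--     s = str(start)
--     start_digit = ord(s[0]) - ord('1') + 1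
--     if start_digit - 1 + len(s) > 9:
--         return 1, 1
--     expected = ''.join(chr(ord(s[0]) + i) for i in range(len(s)))
--     if s > expected:
--         return start_digit + 1, 0
--     return start_digit, 0
-- ===== Notes on version B (the rewrite author's own statement) =====
-- stated objective: simpler
-- what changed: A's incremental digit walk with early exits (and a dead inner re-check of the overflow guard) is replaced by building the expected sequential string once and deciding with a single lexicographic string comparison.
import Mathlib
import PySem

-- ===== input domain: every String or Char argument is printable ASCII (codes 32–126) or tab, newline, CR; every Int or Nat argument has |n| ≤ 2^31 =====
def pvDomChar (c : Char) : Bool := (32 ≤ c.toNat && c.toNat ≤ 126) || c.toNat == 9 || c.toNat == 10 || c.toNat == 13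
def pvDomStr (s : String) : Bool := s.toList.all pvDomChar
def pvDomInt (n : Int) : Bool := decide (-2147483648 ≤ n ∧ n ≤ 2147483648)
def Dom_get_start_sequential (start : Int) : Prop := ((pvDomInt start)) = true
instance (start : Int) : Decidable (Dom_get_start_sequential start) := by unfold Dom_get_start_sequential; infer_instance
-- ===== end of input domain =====

-- B replaces A's incremental digit walk (with an early exit and a dead re-check of the
-- overflow guard) by building the expected sequential string once and doing a single
-- lexicographic string comparison; objective: simpler.

-- ===== PORT A =====
-- the for-loop of A: chars still to visit, current, start_digit, len(start)
-- (the inner 'start_digit - 1 + len(start) > 9' re-check is kept although the earlier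
-- guard makes it unreachable — faithful transliteration)
def pvLoopA : List Char → Int → Int → Int → Int × Int
  | [], _, sd, _ => (sd, 0)                           -- loop ends: return start_digit, 0
  | c :: rest, cur, sd, n =>
    if (c.toNat : Int) = cur then pvLoopA rest (cur + 1) sd n
    else if (c.toNat : Int) > cur then
      (if sd - 1 + n > 9 then (1, 1) else (sd + 1, 0))
    else (sd, 0)                                      -- break, then return start_digit, 0

def get_start_sequential (start : Int) : Int × Int :=
  let s := PySem.Int.toChars start                    -- start = str(start)
  -- s[0]: str(int) is never empty, so the pyGetD default is never used
  let current : Int := (PySem.List.pyGetD s 0 ' ').toNat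
  let start_digit := current - 49 + 1                 -- ord('1') = 49
  if start_digit - 1 + (s.length : Int) > 9 then (1, 1)
  else pvLoopA s current start_digit (s.length : Int)

-- ===== PORT B =====
def get_start_sequential_alt (start : Int) : Int × Int :=
  let s := PySem.Int.toChars start                    -- s = str(start)
  let c0 : Int := (PySem.List.pyGetD s 0 ' ').toNat   -- ord(s[0]); str(int) is never empty
  let start_digit := c0 - 49 + 1
  if start_digit - 1 + (s.length : Int) > 9 then (1, 1)
  else
    -- expected = ''.join(chr(ord(s[0]) + i) for i in range(len(s)))
    let expected := (PySem.List.pyRange 0 (s.length : Int) 1).map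
      (fun i => Char.ofNat (c0 + i).toNat)
    if PySem.Chars.strLt expected s then (start_digit + 1, 0)  -- s > expected
    else (start_digit, 0)

-- ===== PRECONDITION & SPEC =====
def Spec_get_start_sequential (start : Int) (out : Int × Int) : Prop := out = get_start_sequential_alt start
instance (start : Int) (out : Int × Int) : Decidable (Spec_get_start_sequential start out) := by unfold Spec_get_start_sequential; infer_instance

-- ===== CLAIM (what is proved, stated in full; the proofs are below) =====
def Claim_equal_get_start_sequential : Prop := ∀ (start : Int), Dom_get_start_sequential start → Spec_get_start_sequential start (get_start_sequential start)

-- ===== LEMMAS AND PROOFS =====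

-- the expected sequential chars starting at code cur, as a plain range map (proof helper)
def pvSeq (cur : Int) (k : Nat) : List Char :=
  (List.range k).map (fun (i : Nat) => Char.ofNat (cur + (i : Int)).toNat)

theorem pvChar_toNat_ofNat (n : Nat) (h : n < 55296) : (Char.ofNat n).toNat = n := by
  unfold Char.ofNat
  rw [dif_pos (Or.inl (by omega : n < 0xd800))]
  simp [Char.ofNatAux, Char.toNat]

theorem pvSeq_succ (cur : Int) (k : Nat) :
    pvSeq cur (k + 1) = Char.ofNat cur.toNat :: pvSeq (cur + 1) k := by
  apply List.ext_getElem
  · simp [pvSeq]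
  · intro i h1 h2
    rcases i with _ | i
    · simp [pvSeq]
    · simp [pvSeq]; congr 2; omega

theorem pvLoopA_eq_cmp (cs : List Char) (cur sd n : Int)
    (hcur : 0 ≤ cur) (hbound : cur + (cs.length : Int) ≤ 128)
    (hguard : ¬ sd - 1 + n > 9) :
    pvLoopA cs cur sd n =
      if PySem.Chars.strLt (pvSeq cur cs.length) cs then (sd + 1, 0) else (sd, 0) := by
  induction cs generalizing cur with
  | nil => simp [pvLoopA, pvSeq, PySem.Chars.strLt]
  | cons c rest ih =>
    have hlen : (c :: rest).length = rest.length + 1 := rfl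
    rw [hlen, pvSeq_succ]
    have hval : cur.toNat < 55296 := by
      simp only [List.length_cons] at hbound; omega
    have hhead : (Char.ofNat cur.toNat).toNat = cur.toNat := pvChar_toNat_ofNat _ hval
    simp only [pvLoopA]
    by_cases heq : (c.toNat : Int) = cur
    · -- chars agree: the head chars are equal, strLt looks at the tails
      have hc : Char.ofNat cur.toNat = c := by
        apply Char.ext; apply UInt32.toNat.inj
        show (Char.ofNat cur.toNat).toNat = c.toNat
        omega
      rw [if_pos heq, ih (cur + 1) (by omega)
        (by simp only [List.length_cons] at hbound; push_cast at hbound ⊢; omega)]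
      simp only [PySem.Chars.strLt, hc, decide_eq_true_eq]
      congr 1
      simp
    · rw [if_neg heq]
      by_cases hgt : (c.toNat : Int) > cur
      · -- s's char is greater: lex-lt holds at the head
        rw [if_pos hgt, if_neg hguard]
        have hlt : Char.ofNat cur.toNat < c := by
          show (Char.ofNat cur.toNat).toNat < c.toNat
          omega
        simp [PySem.Chars.strLt, List.cons_lt_cons_iff, hlt]
      · -- s's char is smaller: break; lex-lt fails
        rw [if_neg hgt]
        have hlt : c < Char.ofNat cur.toNat := by
          show c.toNat < (Char.ofNat cur.toNat).toNat
          omega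
        have hne : ¬ Char.ofNat cur.toNat = c := by
          intro h; rw [h] at hlt; exact lt_irrefl _ hlt
        have hnlt : ¬ Char.ofNat cur.toNat < c := not_lt.mpr hlt.le
        simp [PySem.Chars.strLt, List.cons_lt_cons_iff, hne, hnlt]

-- B's range-built expected string is pvSeq
theorem pvExpected_eq_pvSeq (c0 : Int) (len : Nat) :
    (PySem.List.pyRange 0 (len : Int) 1).map (fun i => Char.ofNat (c0 + i).toNat)
      = pvSeq c0 len := by
  rw [PySem.List.pyRange_zero_natCast, List.map_map]
  rfl

-- ===== VERDICT (by name: the statement is the Claim_ definition above) =====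
theorem get_start_sequential_spec : Claim_equal_get_start_sequential := by
  intro start _
  show get_start_sequential start = get_start_sequential_alt start
  unfold get_start_sequential get_start_sequential_alt
  dsimp only
  generalize PySem.Int.toChars start = s
  generalize hc : ((PySem.List.pyGetD s 0 ' ').toNat : Int) = c0
  have hc0 : 0 ≤ c0 := hc ▸ Int.natCast_nonneg _
  by_cases hguard : c0 - 49 + 1 - 1 + (s.length : Int) > 9
  · rw [if_pos hguard, if_pos hguard]
  · rw [if_neg hguard, if_neg hguard, pvExpected_eq_pvSeq,
      pvLoopA_eq_cmp s c0 (c0 - 49 + 1) (s.length : Int) hc0 (by omega) hguard]
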